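-- pv_equiv track=rewrite | github.com/martinbong/gpt_for_terminal | mastermind.py | guess_dict
-- ===== SOURCE A (Python) =====
-- def guess_dict(letters, guess):
--     guess_d = {}
--     for i in letters:
--         guess_d[i] = guess_d.get(i, 0)
--     for i in guess:
--         if i in guess_d:
--             guess_d[i] += 1
--     return guess_d
-- ===== SOURCE B (Python) =====
-- def guess_dict(letters, guess):
--     return {i: guess.count(i) for i in letters}
-- ===== Notes on version B (the rewrite author's own statement) =====
-- stated objective: simpler
-- what changed: A seeds a dict with the letters and mutates it with a guarded increment while scanning guess once; B keeps no counter state at all and builds the result directly with a dict comprehension that scans guess per letter via list.count.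
import Mathlib
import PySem

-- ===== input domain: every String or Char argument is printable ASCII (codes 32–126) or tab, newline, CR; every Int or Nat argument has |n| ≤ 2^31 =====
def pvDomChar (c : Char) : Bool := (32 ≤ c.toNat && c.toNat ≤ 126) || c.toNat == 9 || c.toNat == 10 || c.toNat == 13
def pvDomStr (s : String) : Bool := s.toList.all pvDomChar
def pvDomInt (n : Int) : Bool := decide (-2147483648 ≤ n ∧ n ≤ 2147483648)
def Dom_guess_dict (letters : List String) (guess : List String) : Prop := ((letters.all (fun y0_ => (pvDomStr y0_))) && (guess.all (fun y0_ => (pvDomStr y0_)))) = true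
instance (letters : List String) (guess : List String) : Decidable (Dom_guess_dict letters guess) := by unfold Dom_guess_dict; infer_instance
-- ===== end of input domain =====

-- B replaces A's seeded dict with a guarded in-place increment scan by a direct dict comprehension counting each letter with list.count (simpler; no counter state).


-- ===== PORT A =====
def guess_dict (letters : List String) (guess : List String) : List (String × Int) :=
  -- guess_d = {}; for i in letters: guess_d[i] = guess_d.get(i, 0)
  let d0 : PySem.Dict String Int :=
    letters.foldl (fun d i => d.insert i (d.getD i 0)) PySem.Dict.empty
  -- for i in guess: if i in guess_d: guess_d[i] += 1
  let d1 : PySem.Dict String Int :=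
    guess.foldl (fun d i => if d.contains i then d.insert i (d.getD i 0 + 1) else d) d0
  d1.items

-- ===== PORT B =====
def guess_dict_alt (letters : List String) (guess : List String) : List (String × Int) :=
  -- return {i: guess.count(i) for i in letters}
  (letters.foldl (fun d i => d.insert i ((PySem.List.count guess i : Int))) PySem.Dict.empty).items

-- ===== PRECONDITION & SPEC =====
def Spec_guess_dict (letters : List String) (guess : List String) (out : List (String × Int)) : Prop := out = guess_dict_alt letters guess
instance (letters : List String) (guess : List String) (out : List (String × Int)) : Decidable (Spec_guess_dict letters guess out) := by unfold Spec_guess_dict; infer_instance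

-- ===== CLAIM (what is proved, stated in full; the proofs are below) =====
def Claim_equal_guess_dict : Prop := ∀ (letters : List String) (guess : List String), Dom_guess_dict letters guess → Spec_guess_dict letters guess (guess_dict letters guess)

-- ===== LEMMAS AND PROOFS =====

-- A's second loop (guarded increment) never changes the key set.
theorem keys_guardedFold (guess : List String) (d : PySem.Dict String Int) :
    (guess.foldl (fun d i => if d.contains i then d.insert i (d.getD i 0 + 1) else d) d).keys = d.keys := by
  induction guess generalizing d with
  | nil => rfl
  | cons g rest ih =>
    simp only [List.foldl_cons]
    by_cases h : d.contains g = true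
    · rw [if_pos h, ih, PySem.Dict.keys_insert_of_contains _ _ h]
    · rw [if_neg h, ih]

-- A's second loop adds guess.count k to every contained key, leaves the rest.
theorem getD_guardedFold (guess : List String) (d : PySem.Dict String Int) (k : String) :
    (guess.foldl (fun d i => if d.contains i then d.insert i (d.getD i 0 + 1) else d) d).getD k 0 =
      if d.contains k then d.getD k 0 + guess.count k else d.getD k 0 := by
  induction guess generalizing d with
  | nil => simp
  | cons g rest ih =>
    simp only [List.foldl_cons, List.count_cons]
    by_cases hg : d.contains g = true
    · rw [if_pos hg, ih]
      by_cases hk : k = g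
      · subst hk
        simp [hg]
        omega
      · have h1 : (PySem.Dict.insert d g (d.getD g 0 + 1)).contains k = d.contains k := by
          rw [PySem.Dict.contains_insert]; simp [hk]
        have h2 : (PySem.Dict.insert d g (d.getD g 0 + 1)).getD k 0 = d.getD k 0 := by
          rw [PySem.Dict.getD_insert, if_neg hk]
        rw [h1, h2]
        simp [Ne.symm hk]
    · rw [if_neg hg, ih]
      by_cases hk : k = g
      · subst hk; simp [hg]
      · simp [Ne.symm hk]

-- A's first loop: every value is 0.
theorem getD_seedFold (letters : List String) (d : PySem.Dict String Int)
    (h : ∀ k, d.getD k 0 = 0) (k : String) :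
    (letters.foldl (fun d i => d.insert i (d.getD i 0)) d).getD k 0 = 0 := by
  induction letters generalizing d with
  | nil => exact h k
  | cons i rest ih =>
    simp only [List.foldl_cons]
    refine ih _ (fun k' => ?_)
    rw [PySem.Dict.getD_insert]
    split_ifs with hk
    · exact h i
    · exact h k'

-- B's comprehension loop: value at a member key is f k (the value depends only on the key).
theorem getD_compFold (f : String → Int) (letters : List String)
    (d : PySem.Dict String Int) (k : String) :
    (letters.foldl (fun d i => d.insert i (f i)) d).getD k 0 =
      if k ∈ letters then f k else d.getD k 0 := by
  induction letters generalizing d with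
  | nil => simp
  | cons i rest ih =>
    simp only [List.foldl_cons, List.mem_cons]
    rw [ih]
    by_cases hr : k ∈ rest
    · simp [hr]
    · rw [if_neg hr, PySem.Dict.getD_insert]
      by_cases hk : k = i <;> simp [hk, hr]

theorem guess_dict_eq (letters : List String) (guess : List String) :
    guess_dict letters guess = guess_dict_alt letters guess := by
  unfold guess_dict guess_dict_alt
  simp only []
  set d0 : PySem.Dict String Int :=
    letters.foldl (fun d i => d.insert i (d.getD i 0)) PySem.Dict.empty with hd0
  set d1 : PySem.Dict String Int :=
    guess.foldl (fun d i => if d.contains i then d.insert i (d.getD i 0 + 1) else d) d0 with hd1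
  set d2 : PySem.Dict String Int :=
    letters.foldl (fun d i => d.insert i ((PySem.List.count guess i : Int))) PySem.Dict.empty with hd2
  -- keys
  have hk0 : d0.keys = PySem.Set.ofList letters := by
    rw [hd0, PySem.Dict.keys_foldl_insert, PySem.Dict.keys_empty, PySem.Set.update_nil_left]
  have hk1 : d1.keys = PySem.Set.ofList letters := by rw [hd1, keys_guardedFold, hk0]
  have hk2 : d2.keys = PySem.Set.ofList letters := by
    rw [hd2, PySem.Dict.keys_foldl_insert, PySem.Dict.keys_empty, PySem.Set.update_nil_left]
  have hnd0 : d0.keys.Nodup := by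
    rw [hd0]; exact PySem.Dict.nodup_keys_foldl_insert _ _ _ PySem.Dict.nodup_keys_empty
  have hnd1 : d1.keys.Nodup := by rw [hk1, ← hk0]; exact hnd0
  have hnd2 : d2.keys.Nodup := by
    rw [hd2]; exact PySem.Dict.nodup_keys_foldl_insert _ _ _ PySem.Dict.nodup_keys_empty
  -- values agree on the common keys
  have hval : ∀ k ∈ PySem.Set.ofList letters, d1.getD k 0 = d2.getD k 0 := by
    intro k hk
    have hmem : k ∈ letters := (PySem.Set.mem_ofList _ _).mp hk
    have hc : d0.contains k = true := by
      rw [PySem.Dict.contains_iff_mem_keys, hk0]; exact hk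
    rw [hd1, getD_guardedFold, if_pos hc]
    rw [hd0, getD_seedFold _ _ (fun k' => PySem.Dict.getD_empty _ _), hd2,
      getD_compFold, if_pos hmem, PySem.List.count_eq]
    ring
  rw [PySem.Dict.items_eq_map_keys d1 hnd1 0, PySem.Dict.items_eq_map_keys d2 hnd2 0, hk1, hk2]
  exact List.map_congr_left (fun k hk => by rw [hval k hk])

-- ===== VERDICT (by name: the statement is the Claim_ definition above) =====
theorem guess_dict_spec : Claim_equal_guess_dict := by
  intro letters guess _
  unfold Spec_guess_dict
  exact guess_dict_eq letters guess
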